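-- pv_equiv track=rewrite | github.com/iveelsm/adventofcode | 2017/day9/main.py | part_one
-- ===== SOURCE A (Python) =====
-- def part_one(input_str):
--     char_list = []
--     ret = 0
--     i = 0
--     in_garbage = False
--     while i < len(input_str):
--         if input_str[i] == "!":
--             i += 1
--         else:
--             if in_garbage:
--                 if input_str[i] == ">":
--                     in_garbage = False
--             elif input_str[i] == "<":
--                 in_garbage = True
--             else:
--                 [char_list, inc] = apply_operation(char_list, input_str[i])
--                 ret += inc
--         i += 1
--
--     return ret
--
-- def apply_operation(char_list, i):
--     if i == '{':
--         return add_value(char_list, i)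
--     elif i == '}':
--         return remove_until_last(char_list, '{')
--     else:
--         return [char_list, 0]
--
-- def add_value(char_list, i):
--     char_list.append(i)
--     return [char_list, 0]
--
-- def remove_until_last(char_list, char):
--     slice_index = ''.join(char_list).rfind(char)
--     ret = number_of_left_braces(char_list)
--     return [char_list[:slice_index], ret]
--
-- def number_of_left_braces(char_list):
--     return char_list.count("{")
-- ===== SOURCE B (Python) =====
-- import re
--
-- def part_one(input_str):
--     # Pass 1: delete every escape pair '!x' (DOTALL so '!' + newline is a pair too).
--     s = re.sub(r'(?s)!.', '', input_str)
--     # Pass 2: delete garbage '<...>' (up to the first '>', or to end of string if unclosed).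
--     s = re.sub(r'<[^>]*(?:>|$)', '', s)
--     # Pass 3: count: each group scores its depth when it closes.
--     ret = 0
--     depth = 0
--     for c in s:
--         if c == '{':
--             depth += 1
--         elif c == '}':
--             ret += depth
--             depth = max(depth - 1, 0)
--     return ret
-- ===== Notes on version B (the rewrite author's own statement) =====
-- stated objective: faster
-- what changed: Replaces A's single-pass interleaved state machine (explicit brace stack with rfind/count rescans on every '}') with a clean-then-count decomposition: strip escape pairs and garbage in two regex passes, then one integer-depth scan; the stack and its repeated scans disappear.
import Mathlib
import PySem

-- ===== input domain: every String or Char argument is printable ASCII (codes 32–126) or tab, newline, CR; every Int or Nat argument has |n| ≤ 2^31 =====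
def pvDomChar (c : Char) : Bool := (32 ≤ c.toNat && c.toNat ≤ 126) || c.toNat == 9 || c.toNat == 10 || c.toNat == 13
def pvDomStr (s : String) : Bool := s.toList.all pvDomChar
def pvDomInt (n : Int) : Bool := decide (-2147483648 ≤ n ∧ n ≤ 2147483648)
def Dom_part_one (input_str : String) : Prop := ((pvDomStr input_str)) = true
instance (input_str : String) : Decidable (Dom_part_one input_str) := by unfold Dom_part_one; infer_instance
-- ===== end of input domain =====

-- B replaces A's interleaved state machine (brace stack + rfind/count per '}') with
-- strip-escapes, strip-garbage, then one depth-counting scan; return values agree everywhere.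

-- ===== PORT A =====
def pv_number_of_left_braces (char_list : List Char) : Int :=
  (PySem.List.count char_list '{' : Int)

-- ''.join(char_list).rfind(char): PySem.Chars.rfind on the char list is exact for a 1-char needle
def pv_remove_until_last (char_list : List Char) (c : Char) : List Char × Int :=
  let slice_index := PySem.Chars.rfind char_list [c]
  let ret := pv_number_of_left_braces char_list
  (PySem.List.slice char_list (some 0) (some slice_index), ret)

def pv_add_value (char_list : List Char) (i : Char) : List Char × Int :=
  (char_list ++ [i], 0)

def pv_apply_operation (char_list : List Char) (i : Char) : List Char × Int :=
  if i = '{' then pv_add_value char_list i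
  else if i = '}' then pv_remove_until_last char_list '{'
  else (char_list, 0)

-- the while loop of A: on '!' the index advances by 2 (skips the next char)
def pv_loopA : List Char → List Char → Int → Bool → Int
  | [], _, ret, _ => ret
  | c :: rest, char_list, ret, in_garbage =>
    if c = '!' then
      match rest with
      | [] => ret
      | _ :: rest' => pv_loopA rest' char_list ret in_garbage
    else if in_garbage then
      pv_loopA rest char_list ret (if c = '>' then false else true)
    else if c = '<' then
      pv_loopA rest char_list ret true
    else
      let p := pv_apply_operation char_list c
      pv_loopA rest p.1 (ret + p.2) in_garbage

def part_one (input_str : String) : Int :=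
  pv_loopA input_str.toList [] 0 false

-- ===== PORT B =====
-- re.sub(r'(?s)!.', '', s): delete each leftmost '!'+char pair (a lone trailing '!' stays)
def pv_stripEscapes : List Char → List Char
  | [] => []
  | c :: rest =>
    if c = '!' then
      match rest with
      | [] => ['!']
      | _ :: rest' => pv_stripEscapes rest'
    else c :: pv_stripEscapes rest

-- re.sub(r'<[^>]*(?:>|$)', '', s): delete each leftmost garbage run '<' up to the first '>'
-- (or to the end of the string); the Bool is "inside a match being deleted"
def pv_stripGarbage : List Char → Bool → List Char
  | [], _ => []
  | c :: rest, true => pv_stripGarbage rest (if c = '>' then false else true)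
  | c :: rest, false =>
    if c = '<' then pv_stripGarbage rest true
    else c :: pv_stripGarbage rest false

-- the counting loop of B
def pv_countB : List Char → Int → Int → Int
  | [], _, ret => ret
  | c :: rest, depth, ret =>
    if c = '{' then pv_countB rest (depth + 1) ret
    else if c = '}' then pv_countB rest (max (depth - 1) 0) (ret + depth)
    else pv_countB rest depth ret

def part_one_alt (input_str : String) : Int :=
  pv_countB (pv_stripGarbage (pv_stripEscapes input_str.toList) false) 0 0

-- ===== PRECONDITION & SPEC =====
def Spec_part_one (input_str : String) (out : Int) : Prop := out = part_one_alt input_str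
instance (input_str : String) (out : Int) : Decidable (Spec_part_one input_str out) := by unfold Spec_part_one; infer_instance

-- ===== CLAIM (what is proved, stated in full; the proofs are below) =====
def Claim_equal_part_one : Prop := ∀ (input_str : String), Dom_part_one input_str → Spec_part_one input_str (part_one input_str)

-- ===== LEMMAS AND PROOFS =====

-- A's brace stack only ever holds '{'s: it is replicate d '{'
lemma apply_op_open (d : Nat) :
    pv_apply_operation (List.replicate d '{') '{' = (List.replicate (d + 1) '{', 0) := by
  simp [pv_apply_operation, pv_add_value, List.replicate_succ']

lemma rfind_go_replicate : ∀ (j : Nat), ∀ (d : Nat), j ≤ d →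
    PySem.Chars.rfind.go (List.replicate d '{') ['{'] j
      = if d = 0 then -1 else ((min j (d - 1) : Nat) : Int) := by
  intro j
  induction j with
  | zero =>
    intro d _
    cases d with
    | zero => simp [PySem.Chars.rfind.go]
    | succ t => simp [PySem.Chars.rfind.go, List.replicate_succ, List.isPrefixOf]
  | succ j ih =>
    intro d hj
    have hd : d ≠ 0 := by omega
    rcases Nat.lt_or_ge (j + 1) d with h | h
    · have : Nat.succ j < d := h
      have hdrop : List.drop (j + 1) (List.replicate d '{') = List.replicate (d - (j + 1)) '{' :=
        List.drop_replicate ..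
      have hne : d - (j + 1) ≠ 0 := by omega
      obtain ⟨t, ht⟩ := Nat.exists_eq_succ_of_ne_zero hne
      simp only [PySem.Chars.rfind.go, hdrop, ht, List.replicate_succ, List.isPrefixOf,
        BEq.rfl, Bool.true_and]
      simp only [if_pos]
      have : min (j + 1) (d - 1) = j + 1 := by omega
      simp [hd, this]
    · have heq : j + 1 = d := by omega
      have hdrop : List.drop (j + 1) (List.replicate d '{') = [] := by
        simp [List.drop_replicate, heq]
      simp only [PySem.Chars.rfind.go, hdrop]
      have : (['{'] : List Char).isPrefixOf [] = false := by decide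
      rw [this]
      simp only [Bool.false_eq_true, if_false]
      rw [ih d (by omega)]
      have : min j (d - 1) = min (j + 1) (d - 1) := by omega
      simp [hd, this]

lemma rfind_replicate (d : Nat) :
    PySem.Chars.rfind (List.replicate d '{') ['{'] = (d : Int) - 1 := by
  unfold PySem.Chars.rfind
  rw [List.length_replicate, rfind_go_replicate d d le_rfl]
  cases d with
  | zero => simp
  | succ t => simp

lemma slice_replicate (d : Nat) :
    PySem.List.slice (List.replicate d '{') none (some ((d : Int) - 1))
      = List.replicate (d - 1) '{' := by
  cases d with
  | zero => simp [PySem.List.slice_to_neg_one]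
  | succ t =>
    have : ((t + 1 : Nat) : Int) - 1 = ((t : Nat) : Int) := by push_cast; ring
    rw [this]
    simp [PySem.List.slice_to_natCast, List.take_replicate]

lemma apply_op_close (d : Nat) :
    pv_apply_operation (List.replicate d '{') '}' = (List.replicate (d - 1) '{', (d : Int)) := by
  simp [pv_apply_operation, pv_remove_until_last, pv_number_of_left_braces,
    rfind_replicate, slice_replicate]

lemma stripEscapes_cons_ne {c : Char} {rest : List Char} (h : ¬ c = '!') :
    pv_stripEscapes (c :: rest) = c :: pv_stripEscapes rest := by
  cases rest <;> simp [pv_stripEscapes, h]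

lemma loopA_cons_ne {c : Char} {rest char_list : List Char} {ret : Int} {g : Bool}
    (h : ¬ c = '!') :
    pv_loopA (c :: rest) char_list ret g =
      if g then pv_loopA rest char_list ret (if c = '>' then false else true)
      else if c = '<' then pv_loopA rest char_list ret true
      else pv_loopA rest (pv_apply_operation char_list c).1
        (ret + (pv_apply_operation char_list c).2) g := by
  cases rest <;> cases g <;> simp [pv_loopA, h]

lemma main_lemma : ∀ (n : Nat) (l : List Char), l.length ≤ n →
    ∀ (d : Nat) (ret : Int) (g : Bool),
    pv_loopA l (List.replicate d '{') ret g
      = pv_countB (pv_stripGarbage (pv_stripEscapes l) g) d ret := by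
  intro n
  induction n with
  | zero =>
    intro l hl d ret g
    have : l = [] := List.length_eq_zero_iff.mp (Nat.le_zero.mp hl)
    subst this
    simp [pv_loopA, pv_stripEscapes, pv_stripGarbage, pv_countB]
  | succ n ih =>
    intro l hl d ret g
    rcases l with _ | ⟨c, rest⟩
    · simp [pv_loopA, pv_stripEscapes, pv_stripGarbage, pv_countB]
    · by_cases hbang : c = '!'
      · subst hbang
        rcases rest with _ | ⟨x, rest'⟩
        · cases g <;>
            simp [pv_loopA, pv_stripEscapes, pv_stripGarbage, pv_countB]
        · have hlen : rest'.length ≤ n := by simp at hl; omega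
          simp only [pv_loopA, pv_stripEscapes]
          exact ih rest' hlen d ret g
      · have hlen : rest.length ≤ n := by simp at hl; omega
        rw [loopA_cons_ne hbang, stripEscapes_cons_ne hbang]
        cases g with
        | true =>
          by_cases hgt : c = '>'
          · subst hgt
            simp only [pv_stripGarbage, if_true]
            exact ih rest hlen d ret false
          · simp only [pv_stripGarbage, if_neg hgt, if_true]
            exact ih rest hlen d ret true
        | false =>
          by_cases hlt : c = '<'
          · subst hlt
            simp only [pv_stripGarbage, Bool.false_eq_true, if_false]
            exact ih rest hlen d ret true
          · simp only [pv_stripGarbage, if_neg hlt, Bool.false_eq_true, if_false]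
            by_cases hopen : c = '{'
            · subst hopen
              simp only [apply_op_open, pv_countB]
              simpa using ih rest hlen (d + 1) ret false
            · by_cases hclose : c = '}'
              · subst hclose
                simp only [apply_op_close, pv_countB, if_neg hopen]
                rw [ih rest hlen (d - 1) (ret + d) false]
                congr 1
                omega
              · simp only [pv_apply_operation, pv_countB,
                  if_neg hopen, if_neg hclose]
                simpa using ih rest hlen d ret false

-- ===== VERDICT (by name: the statement is the Claim_ definition above) =====
theorem part_one_spec : Claim_equal_part_one := by
  intro s _
  unfold Spec_part_one part_one part_one_alt
  simpa using main_lemma s.toList.length s.toList le_rfl 0 0 false
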